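-- pv_equiv track=rewrite | github.com/drather/PS | exercise/programmers/Programmers_연습문제_수박수박수.py | solution
-- ===== SOURCE A (Python) =====
-- def solution(n):
--     answer = ''
--     if n % 2 == 1:
--         for i in range(n//2):
--             answer += "수박"
--         answer += "수"
--
--     else:
--         for i in range(n//2):
--             answer += "수박"
--
--     return answer
-- ===== SOURCE B (Python) =====
-- def solution(n):
--     return ''.join('수' if i % 2 == 0 else '박' for i in range(n))
-- ===== Notes on version B (the rewrite author's own statement) =====
-- stated objective: simpler
-- what changed: Replaces the parity branch and the pair-appending loop by a single per-character pass: join '수' or '박' chosen by index parity over range(n).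
-- intended difference: On negative odd n A's unconditional trailing append returns '수' even though the loop is empty; B returns '' (the natural value for a nonpositive length), which is the intended behaviour. — e.g. on solution(-1): A returns "수", B returns ""
import Mathlib
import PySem

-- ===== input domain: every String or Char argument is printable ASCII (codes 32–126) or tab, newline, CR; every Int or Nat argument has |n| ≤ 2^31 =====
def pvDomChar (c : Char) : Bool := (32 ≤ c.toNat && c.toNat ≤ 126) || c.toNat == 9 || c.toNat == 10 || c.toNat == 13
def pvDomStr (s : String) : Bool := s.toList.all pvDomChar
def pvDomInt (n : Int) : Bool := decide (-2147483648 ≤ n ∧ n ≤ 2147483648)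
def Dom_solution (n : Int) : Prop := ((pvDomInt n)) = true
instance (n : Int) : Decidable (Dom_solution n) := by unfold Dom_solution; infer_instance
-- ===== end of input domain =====

-- B builds the string character by character (parity of the index picks '수' or '박', joined over
-- range(n)) instead of A's parity branch plus pair-appending loop; intended difference on negative odd n.

-- ===== PORT A =====
def solution (n : Int) : String :=
  let answer : String := ""
  if PySem.Int.mod n 2 = 1 then
    ((PySem.List.pyRange 0 (PySem.Int.floordiv n 2) 1).foldl
      (fun a (_ : Int) => a ++ "수박") answer) ++ "수"
  else
    (PySem.List.pyRange 0 (PySem.Int.floordiv n 2) 1).foldl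
      (fun a (_ : Int) => a ++ "수박") answer

-- ===== PORT B =====
def solution_alt (n : Int) : String :=
  PySem.Str.join "" ((PySem.List.pyRange 0 n 1).map
    (fun i => if PySem.Int.mod i 2 = 0 then "수" else "박"))

-- ===== PRECONDITION & SPEC =====
-- On negative odd n A's unconditional trailing append returns "수" although the loop runs zero
-- times; B returns "" (the natural value for a nonpositive length), which is the intended value.
def D_solution (n : Int) : Prop := n < 0 ∧ n % 2 = 1
instance (n : Int) : Decidable (D_solution n) := by unfold D_solution; infer_instance
def Spec_solution (n : Int) (out : String) : Prop := ¬ D_solution n → out = solution_alt n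
instance (n : Int) (out : String) : Decidable (Spec_solution n out) := by unfold Spec_solution; infer_instance
def pvDiffWitness_solution : Int := (-1)
def pvDiffWitnessOut_solution : String × String := ("수", "")

-- ===== CLAIM (what is proved, stated in full; the proofs are below) =====
def Claim_unchanged_solution : Prop := ∀ (n : Int), Dom_solution n → Spec_solution n (solution n)
def Claim_changed_solution : Prop := Dom_solution (pvDiffWitness_solution) ∧ D_solution (pvDiffWitness_solution) ∧ solution (pvDiffWitness_solution) = pvDiffWitnessOut_solution.1 ∧ solution_alt (pvDiffWitness_solution) = pvDiffWitnessOut_solution.2 ∧ pvDiffWitnessOut_solution.1 ≠ pvDiffWitnessOut_solution.2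
def Claim_exact_solution : Prop := ∀ (n : Int), Dom_solution n → D_solution n → solution n ≠ solution_alt n

-- ===== LEMMAS AND PROOFS =====

-- joining with the empty separator concatenates the pieces
theorem pv_join_empty (ps : List (List Char)) : PySem.Chars.join [] ps = ps.flatten := by
  induction ps with
  | nil => simp [PySem.Chars.join_nil]
  | cons p rest ih =>
      cases rest with
      | nil => simp [PySem.Chars.join_singleton]
      | cons q r => simp only [PySem.Chars.join_cons_cons] at *; simp [ih]

-- A's append loop over any list builds the repeated block
theorem pv_foldl_app (l : List Int) (s : String) :
    l.foldl (fun a (_ : Int) => a ++ "수박") s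
      = s ++ String.ofList ((List.replicate l.length "수박".toList).flatten) := by
  induction l generalizing s with
  | nil => simp
  | cons x t ih =>
      simp only [List.foldl_cons, ih, List.length_cons, List.replicate_succ, List.flatten_cons,
        String.ofList_append, ← String.append_assoc]
      congr 1

-- B's character list over an even range is the repeated pair block
theorem pv_B_chars (k : Nat) :
    (((PySem.List.pyRange 0 (2 * (k : Int)) 1).map
        (fun i => if PySem.Int.mod i 2 = 0 then "수" else "박")).map String.toList).flatten
      = (List.replicate k ("수박".toList)).flatten := by
  induction k with
  | zero =>
      rw [show (2 : Int) * ((0 : Nat) : Int) = 0 by norm_num, PySem.List.pyRange_one_eq_nil le_rfl]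
      simp
  | succ m ih =>
      have hsplit : PySem.List.pyRange 0 (2 * ((m + 1 : Nat) : Int)) 1
          = PySem.List.pyRange 0 (2 * (m : Int)) 1 ++ PySem.List.pyRange (2 * m) (2 * m + 2) 1 := by
        have hcast : (2 : Int) * ((m + 1 : Nat) : Int) = 2 * (m : Int) + 2 := by push_cast; ring
        rw [hcast]
        exact PySem.List.pyRange_one_append 0 (2 * (m : Int)) (2 * (m : Int) + 2)
          (by positivity) (by omega)
      have htail : PySem.List.pyRange (2 * (m : Int)) (2 * m + 2) 1 = [2 * (m : Int), 2 * (m : Int) + 1] := by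
        rw [PySem.List.pyRange_one_cons (by omega), PySem.List.pyRange_one_cons (by omega),
          PySem.List.pyRange_one_eq_nil (by omega)]
      simp only [hsplit, htail, List.map_append, List.flatten_append, ih, List.replicate_succ']
      simp

-- B on an even nonnegative bound, as a string
theorem pv_B_even (k : Nat) :
    solution_alt (2 * (k : Int))
      = String.ofList ((List.replicate k ("수박".toList)).flatten) := by
  unfold solution_alt
  rw [PySem.Str.join, show "".toList = ([] : List Char) from rfl, pv_join_empty, pv_B_chars k]

-- evaluating A when the loop runs k times
theorem pv_A_block (m : Int) (k : Nat) (h : PySem.Int.floordiv m 2 = (k : Int)) (s : String) :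
    (PySem.List.pyRange 0 (PySem.Int.floordiv m 2) 1).foldl (fun a (_ : Int) => a ++ "수박") s
      = s ++ String.ofList ((List.replicate k ("수박".toList)).flatten) := by
  rw [h, pv_foldl_app]
  congr 2
  simp [PySem.List.length_pyRange_one]

-- ===== VERDICT (by name: the statement is the Claim_ definition above) =====
theorem solution_spec : Claim_unchanged_solution := by
  intro n _ hD
  show solution n = solution_alt n
  rcases lt_or_ge n 0 with hneg | hpos
  · -- n < 0 and not in D_, so n is even and negative: both sides are ""
    have heven : n % 2 = 0 := by
      rcases Int.emod_two_eq n with h | h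
      · exact h
      · exact absurd ⟨hneg, h⟩ hD
    have hmod : PySem.Int.mod n 2 = 0 := by
      rw [PySem.Int.mod_eq_emod_of_pos (by norm_num)]; exact heven
    have hfd : PySem.Int.floordiv n 2 ≤ 0 := by
      rw [PySem.Int.floordiv_eq_ediv_of_pos (by norm_num)]; omega
    unfold solution solution_alt
    rw [if_neg (by rw [hmod]; norm_num), PySem.List.pyRange_one_eq_nil hfd,
      PySem.List.pyRange_one_eq_nil (by omega)]
    simp [PySem.Str.join, PySem.Chars.join_nil]
  · -- n ≥ 0
    rcases Int.even_or_odd n with ⟨k, hk⟩ | ⟨k, hk⟩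
    · -- even: n = 2k, loop runs k times, no trailing char
      obtain ⟨j, hj⟩ : ∃ j : Nat, k = (j : Int) := ⟨k.toNat, by omega⟩
      have hmod : PySem.Int.mod n 2 = 0 := by
        rw [PySem.Int.mod_eq_emod_of_pos (by norm_num)]; omega
      have hfd : PySem.Int.floordiv n 2 = (j : Int) := by
        rw [PySem.Int.floordiv_eq_ediv_of_pos (by norm_num)]; omega
      unfold solution
      rw [if_neg (by rw [hmod]; norm_num), pv_A_block n j hfd]
      rw [show n = 2 * (j : Int) by omega, pv_B_even j]
      simp
    · -- odd: n = 2k+1, loop runs k times, trailing "수"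
      obtain ⟨j, hj⟩ : ∃ j : Nat, k = (j : Int) := ⟨k.toNat, by omega⟩
      have hmod : PySem.Int.mod n 2 = 1 := by
        rw [PySem.Int.mod_eq_emod_of_pos (by norm_num)]; omega
      have hfd : PySem.Int.floordiv n 2 = (j : Int) := by
        rw [PySem.Int.floordiv_eq_ediv_of_pos (by norm_num)]; omega
      have hsucc : PySem.List.pyRange 0 n 1
          = PySem.List.pyRange 0 (2 * (j : Int)) 1 ++ [2 * (j : Int)] := by
        rw [show n = 2 * (j : Int) + 1 by omega]
        exact PySem.List.pyRange_one_succ_right (by positivity)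
      have hj0 : PySem.Int.mod (2 * (j : Int)) 2 = 0 := by
        rw [PySem.Int.mod_eq_emod_of_pos (by norm_num)]; omega
      unfold solution
      rw [if_pos hmod, pv_A_block n j hfd]
      unfold solution_alt
      rw [hsucc, PySem.Str.join, show "".toList = ([] : List Char) from rfl, pv_join_empty]
      simp only [List.map_append, List.flatten_append, List.map_cons, List.map_nil, hj0, if_pos]
      rw [String.ofList_append]
      have := pv_B_even j
      unfold solution_alt at this
      rw [PySem.Str.join, show "".toList = ([] : List Char) from rfl, pv_join_empty] at this
      simp only [this]
      simp

theorem solution_changed : Claim_changed_solution := by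
  unfold Claim_changed_solution; decide

theorem solution_tight : Claim_exact_solution := by
  intro n _ hD
  obtain ⟨hneg, hodd⟩ := hD
  have hmod : PySem.Int.mod n 2 = 1 := by
    rw [PySem.Int.mod_eq_emod_of_pos (by norm_num)]; exact hodd
  have hfd : PySem.Int.floordiv n 2 ≤ 0 := by
    rw [PySem.Int.floordiv_eq_ediv_of_pos (by norm_num)]; omega
  unfold solution solution_alt
  rw [if_pos hmod, PySem.List.pyRange_one_eq_nil hfd,
    PySem.List.pyRange_one_eq_nil (by omega)]
  simp [PySem.Str.join, PySem.Chars.join_nil]
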